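-- pv_equiv track=rewrite | github.com/Redpike/advent-of-code | 2017/d06/d06_p2.py | countCycles
-- ===== SOURCE A (Python) =====
-- def findMaxPosition(input_list):
--     max_position = 0
--     max_value = 0
--     for i in range(len(input_list)):
--         if input_list[i] > max_value:
--             max_value = input_list[i]
--             max_position = i
--     return max_position
--
-- def distributeBlocks(input_list, max_position):
--     current_dritributed_list = list(input_list)
--     max_element = current_dritributed_list[max_position]
--     current_dritributed_list[max_position] = 0
--     current_index = max_position
--     while max_element > 0:
--         current_index = (current_index + 1) % len(current_dritributed_list)
--         current_dritributed_list[current_index] += 1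
--         max_element -= 1
--     return current_dritributed_list
--
-- def checkDistanceBeetwenTheSameStates(distributed_blocks, current_list):
--     for position in distributed_blocks:
--         if position[1] == current_list:
--             return position[0]
--
-- def countCycles(input_data):
--     cycle_counter = 0
--     distributed_blocks = [[cycle_counter, input_data]]
--     current_list = input_data
--     while True:
--         cycle_counter += 1
--         max_position = findMaxPosition(list(current_list))
--         current_list = distributeBlocks(list(current_list), max_position)
--
--         if current_list not in list(zip(*distributed_blocks))[1]:
--             distributed_blocks.append([cycle_counter, current_list])
--         else:
--             distance = checkDistanceBeetwenTheSameStates(distributed_blocks, current_list)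
--             return cycle_counter - distance
-- ===== SOURCE B (Python) =====
-- def findMaxPosition(input_list):
--     max_position = 0
--     max_value = 0
--     for i in range(len(input_list)):
--         if input_list[i] > max_value:
--             max_value = input_list[i]
--             max_position = i
--     return max_position
--
-- def distributeBlocks(input_list, max_position):
--     current_dritributed_list = list(input_list)
--     max_element = current_dritributed_list[max_position]
--     current_dritributed_list[max_position] = 0
--     current_index = max_position
--     while max_element > 0:
--         current_index = (current_index + 1) % len(current_dritributed_list)
--         current_dritributed_list[current_index] += 1
--         max_element -= 1
--     return current_dritributed_list
--
-- def _step(state):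
--     return tuple(distributeBlocks(list(state), findMaxPosition(list(state))))
--
-- def countCycles(input_data):
--     # Phase 1: walk until a state repeats, remembering only the set of seen states.
--     state = tuple(input_data)
--     seen = set()
--     while state not in seen:
--         seen.add(state)
--         state = _step(state)
--     # Phase 2: the repeated state starts the loop; walk around it once to measure its length.
--     anchor = state
--     length = 1
--     state = _step(anchor)
--     while state != anchor:
--         state = _step(state)
--         length += 1
--     return length
-- ===== Notes on version B (the rewrite author's own statement) =====
-- stated objective: alternative
-- what changed: Replaces A's growing timestamped log of states (rescanned in full for membership each iteration, then searched again for the matching timestamp and subtracted) by a two-phase walk: phase 1 steps with only a set of seen states until a state repeats, phase 2 walks the cycle once from that repeated state counting steps, which is the loop length; intended as faster on long runs (membership drops from an O(t*n) rescan to a set lookup; measured 5.12x at the largest size both finished, unconfirmed beyond it), measured equal at small sizes.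
import Mathlib
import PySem

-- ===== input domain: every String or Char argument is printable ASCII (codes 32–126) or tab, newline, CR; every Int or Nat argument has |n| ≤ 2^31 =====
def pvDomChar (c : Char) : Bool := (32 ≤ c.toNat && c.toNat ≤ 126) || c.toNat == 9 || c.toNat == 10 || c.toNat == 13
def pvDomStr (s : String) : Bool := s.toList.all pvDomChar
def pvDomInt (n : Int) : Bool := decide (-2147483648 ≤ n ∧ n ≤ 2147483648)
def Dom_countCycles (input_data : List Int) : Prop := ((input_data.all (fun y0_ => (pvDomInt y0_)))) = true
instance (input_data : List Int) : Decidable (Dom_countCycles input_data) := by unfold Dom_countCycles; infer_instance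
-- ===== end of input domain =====

-- B replaces A's timestamped state log (with its O(t) membership rescan and index
-- subtraction) by a two-phase walk: a seen-set until the first repeated state, then one
-- walk around the cycle counting its length.  Both ports are totalized with a large fuel
-- counter (a totalization guard only; at equal exhaustion both return the same default 0).

-- ===== PORT A =====
def findMaxPositionA (input_list : List Int) : Nat :=
  ((List.range input_list.length).foldl
    (fun st i => if input_list.getD i 0 > st.2 then (i, input_list.getD i 0) else st)
    ((0 : Nat), (0 : Int))).1

-- the while loop of distributeBlocks (one +1 per remaining block, round robin)
def distGoA (cur : List Int) (idx : Nat) (m : Int) : List Int :=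
  if 0 < m then
    let idx' := (idx + 1) % cur.length
    distGoA (cur.set idx' (cur.getD idx' 0 + 1)) idx' (m - 1)
  else cur
termination_by m.toNat
decreasing_by simp; omega

-- input_list[max_position]: in range whenever input_list ≠ [] (Pre_); getD is exact there
def distributeBlocksA (input_list : List Int) (max_position : Nat) : List Int :=
  distGoA (input_list.set max_position 0) max_position (input_list.getD max_position 0)

def checkDistanceA (distributed_blocks : List (Int × List Int)) (current_list : List Int) : Option Int :=
  match distributed_blocks with
  | [] => none
  | (c, s) :: rest => if s = current_list then some c else checkDistanceA rest current_list

def pvFuelCC : Nat := 1000000000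

def cyclesGoA (fuel : Nat) (cycle_counter : Int)
    (distributed_blocks : List (Int × List Int)) (current_list : List Int) : Int :=
  match fuel with
  | 0 => 0          -- fuel guard only (the Python loops on)
  | f + 1 =>
    let counter' := cycle_counter + 1
    let max_position := findMaxPositionA current_list
    let cur' := distributeBlocksA current_list max_position
    if (distributed_blocks.map Prod.snd).contains cur' then
      counter' - (checkDistanceA distributed_blocks cur').getD 0
    else
      cyclesGoA f counter' (distributed_blocks ++ [(counter', cur')]) cur'

def countCycles (input_data : List Int) : Int :=
  cyclesGoA pvFuelCC 0 [((0 : Int), input_data)] input_data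

-- ===== PORT B =====
def stepB (state : List Int) : List Int :=
  distributeBlocksA state (findMaxPositionA state)

def phase1B (fuel : Nat) (seen : PySem.Set (List Int)) (state : List Int) : Option (List Int) :=
  match fuel with
  | 0 => none       -- fuel guard only
  | f + 1 =>
    if PySem.Set.contains seen state then some state
    else phase1B f (PySem.Set.add seen state) (stepB state)

def phase2B (fuel : Nat) (anchor : List Int) (length : Int) (state : List Int) : Int :=
  if state = anchor then length
  else
    match fuel with
    | 0 => 0        -- fuel guard only
    | f + 1 => phase2B f anchor (length + 1) (stepB state)

def countCycles_alt (input_data : List Int) : Int :=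
  match phase1B (pvFuelCC + 1) PySem.Set.empty input_data with
  | none => 0       -- fuel guard only (same default as port A at exhaustion)
  | some anchor => phase2B pvFuelCC anchor 1 (stepB anchor)

-- ===== PRECONDITION & SPEC =====
-- Pre_ excludes only the empty list, on which the Python A raises IndexError.
def Pre_countCycles (input_data : List Int) : Prop := input_data ≠ []
instance (input_data : List Int) : Decidable (Pre_countCycles input_data) := by
  unfold Pre_countCycles; infer_instance

def pvWitness_countCycles : List Int := [0, 2, 7, 0]

def Spec_countCycles (input_data : List Int) (out : Int) : Prop := out = countCycles_alt input_data
instance (input_data : List Int) (out : Int) : Decidable (Spec_countCycles input_data out) := by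
  unfold Spec_countCycles; infer_instance

-- ===== CLAIM (what is proved, stated in full; the proofs are below) =====
def Claim_equal_countCycles : Prop := ∀ (input_data : List Int), Dom_countCycles input_data → Pre_countCycles input_data → Spec_countCycles input_data (countCycles input_data)

-- ===== LEMMAS AND PROOFS =====

-- the state after i redistribution steps
def trajCC (x : List Int) (i : Nat) : List Int := stepB^[i] x

-- A's log after c loop iterations
def blocksOf (x : List Int) : Nat → List (Int × List Int)
  | 0 => [((0 : Int), x)]
  | c + 1 => blocksOf x c ++ [(((c : Int) + 1), trajCC x (c + 1))]

-- B's seen-set after c loop iterations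
def seenOf (x : List Int) : Nat → PySem.Set (List Int)
  | 0 => PySem.Set.empty
  | c + 1 => PySem.Set.add (seenOf x c) (trajCC x c)

theorem trajCC_succ (x : List Int) (i : Nat) :
    trajCC x (i + 1) = stepB (trajCC x i) := by
  simp [trajCC, Function.iterate_succ_apply']

theorem mem_blocks_snd (x : List Int) (c : Nat) (T : List Int) :
    T ∈ (blocksOf x c).map Prod.snd ↔ ∃ i, i ≤ c ∧ trajCC x i = T := by
  induction c with
  | zero =>
      constructor
      · intro h; simp [blocksOf] at h; exact ⟨0, le_rfl, by simp [trajCC, h.symm]⟩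
      · rintro ⟨i, hi, hT⟩
        interval_cases i
        simp [blocksOf, ← hT, trajCC]
  | succ c ih =>
      simp only [blocksOf, List.map_append, List.mem_append, ih]
      constructor
      · rintro (⟨i, hi, hT⟩ | h)
        · exact ⟨i, by omega, hT⟩
        · simp at h; exact ⟨c + 1, le_rfl, h.symm⟩
      · rintro ⟨i, hi, hT⟩
        by_cases h : i ≤ c
        · exact Or.inl ⟨i, h, hT⟩
        · have hieq : i = c + 1 := by omega
          subst hieq; right; simp [← hT]

theorem mem_seenOf (x : List Int) (c : Nat) (T : List Int) :
    T ∈ seenOf x c ↔ ∃ i, i < c ∧ trajCC x i = T := by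
  induction c with
  | zero => simp [seenOf, PySem.Set.empty]
  | succ c ih =>
      simp only [seenOf, PySem.Set.mem_add, ih]
      constructor
      · rintro (⟨i, hi, hT⟩ | h)
        · exact ⟨i, by omega, hT⟩
        · exact ⟨c, by omega, h.symm⟩
      · rintro ⟨i, hi, hT⟩
        by_cases h : i < c
        · exact Or.inl ⟨i, h, hT⟩
        · have hieq : i = c := by omega
          subst hieq; exact Or.inr hT.symm

theorem checkDistanceA_append (l1 l2 : List (Int × List Int)) (T : List Int) :
    checkDistanceA (l1 ++ l2) T =
      (match checkDistanceA l1 T with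
       | some v => some v
       | none => checkDistanceA l2 T) := by
  induction l1 with
  | nil => simp [checkDistanceA]
  | cons p rest ih =>
      obtain ⟨c, s⟩ := p
      by_cases h : s = T <;> simp [checkDistanceA, h, ih]

theorem checkDistanceA_none (x : List Int) (c : Nat) (T : List Int)
    (h : ∀ i, i ≤ c → trajCC x i ≠ T) :
    checkDistanceA (blocksOf x c) T = none := by
  induction c with
  | zero =>
      have := h 0 le_rfl
      simp [blocksOf, checkDistanceA, trajCC] at this ⊢
      exact fun hx => absurd hx this
  | succ c ih =>
      rw [blocksOf, checkDistanceA_append,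
        ih (fun i hi => h i (Nat.le_succ_of_le hi))]
      have := h (c + 1) le_rfl
      simp [checkDistanceA, this]

theorem checkDistanceA_first (x : List Int) (c j : Nat) (T : List Int)
    (hj : j ≤ c) (hT : trajCC x j = T) (hmin : ∀ i, i < j → trajCC x i ≠ T) :
    checkDistanceA (blocksOf x c) T = some (j : Int) := by
  induction c with
  | zero =>
      interval_cases j
      simp [blocksOf, checkDistanceA, ← hT, trajCC]
  | succ c ih =>
      rw [blocksOf, checkDistanceA_append]
      by_cases h : j ≤ c
      · rw [ih h]
      · have hjc : j = c + 1 := by omega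
        subst hjc
        rw [checkDistanceA_none x c T (fun i hi => hmin i (by omega))]
        simp [checkDistanceA, hT]

-- Phase-A characterization when the first repeat is at time t (traj t = traj j, j < t)
theorem cyclesGoA_eq (x : List Int) (t j : Nat) (hjt : j < t)
    (hrep : trajCC x t = trajCC x j)
    (hinj : ∀ a b, a < t → b < t → trajCC x a = trajCC x b → a = b) :
    ∀ f c, c < t → t ≤ c + f →
      cyclesGoA f (c : Int) (blocksOf x c) (trajCC x c) = (t : Int) - (j : Int) := by
  intro f
  induction f with
  | zero => intro c hc hcf; omega
  | succ f ih =>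
      intro c hc hcf
      rw [cyclesGoA]
      have hstep : distributeBlocksA (trajCC x c) (findMaxPositionA (trajCC x c)) =
          trajCC x (c + 1) := by rw [trajCC_succ]; rfl
      simp only [hstep]
      by_cases hend : c + 1 = t
      · have hmem : trajCC x (c + 1) ∈ (blocksOf x c).map Prod.snd := by
          rw [mem_blocks_snd]
          exact ⟨j, by omega, by rw [hend, ← hrep]⟩
        rw [if_pos (by simpa using hmem)]
        have hfirst : checkDistanceA (blocksOf x c) (trajCC x (c + 1)) = some (j : Int) := by
          apply checkDistanceA_first x c j _ (by omega)
          · rw [hend, ← hrep]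
          · intro i hij hiT
            have hij2 : trajCC x i = trajCC x j := by rw [hiT, hend, hrep]
            have := hinj i j (by omega) hjt hij2
            omega
        rw [hfirst]
        simp
        omega
      · have hnomem : ¬ trajCC x (c + 1) ∈ (blocksOf x c).map Prod.snd := by
          rw [mem_blocks_snd]
          rintro ⟨i, hi, hT⟩
          have := hinj i (c + 1) (by omega) (by omega) hT
          omega
        rw [if_neg (by simpa using hnomem)]
        have := ih (c + 1) (by omega) (by omega)
        rw [blocksOf] at this
        convert this using 2

-- Phase-A exhaustion: no repeat within reach, the fuel runs out and A's port returns 0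
theorem cyclesGoA_none (x : List Int)
    : ∀ (f c : Nat), (∀ a b, a ≤ c + f → b ≤ c + f → trajCC x a = trajCC x b → a = b) →
      cyclesGoA f (c : Int) (blocksOf x c) (trajCC x c) = 0 := by
  intro f
  induction f with
  | zero => intro c _; rfl
  | succ f ih =>
      intro c hinj
      rw [cyclesGoA]
      have hstep : distributeBlocksA (trajCC x c) (findMaxPositionA (trajCC x c)) =
          trajCC x (c + 1) := by rw [trajCC_succ]; rfl
      simp only [hstep]
      have hnomem : ¬ trajCC x (c + 1) ∈ (blocksOf x c).map Prod.snd := by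
        rw [mem_blocks_snd]
        rintro ⟨i, hi, hT⟩
        have := hinj i (c + 1) (by omega) (by omega) hT
        omega
      rw [if_neg (by simpa using hnomem)]
      have := ih (c + 1) (fun a b ha hb => hinj a b (by omega) (by omega))
      rw [blocksOf] at this
      convert this using 2

-- Phase 1 of B finds the first repeated state
theorem phase1B_eq (x : List Int) (t j : Nat) (hjt : j < t)
    (hrep : trajCC x t = trajCC x j)
    (hinj : ∀ a b, a < t → b < t → trajCC x a = trajCC x b → a = b) :
    ∀ f c, c ≤ t → t < c + f →
      phase1B f (seenOf x c) (trajCC x c) = some (trajCC x t) := by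
  intro f
  induction f with
  | zero => intro c hc hcf; omega
  | succ f ih =>
      intro c hc hcf
      rw [phase1B]
      by_cases hend : c = t
      · subst hend
        have hmem : trajCC x c ∈ seenOf x c := by
          rw [mem_seenOf]; exact ⟨j, hjt, hrep.symm⟩
        rw [if_pos (by rw [PySem.Set.contains_iff]; exact hmem)]
      · have hnomem : ¬ trajCC x c ∈ seenOf x c := by
          rw [mem_seenOf]
          rintro ⟨i, hi, hT⟩
          have := hinj i c (by omega) (by omega) hT
          omega
        rw [if_neg (by rw [PySem.Set.contains_iff]; exact hnomem)]
        have : PySem.Set.add (seenOf x c) (trajCC x c) = seenOf x (c + 1) := rfl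
        rw [this, ← trajCC_succ]
        exact ih (c + 1) (by omega) (by omega)

-- Phase-1 exhaustion: no repeat within the checked window, phase 1 returns none
theorem phase1B_none (x : List Int)
    : ∀ (f c : Nat), (∀ a b, a < c + f → b < c + f → trajCC x a = trajCC x b → a = b) →
      phase1B f (seenOf x c) (trajCC x c) = none := by
  intro f
  induction f with
  | zero => intro c _; rfl
  | succ f ih =>
      intro c hinj
      rw [phase1B]
      have hnomem : ¬ trajCC x c ∈ seenOf x c := by
        rw [mem_seenOf]
        rintro ⟨i, hi, hT⟩
        have := hinj i c (by omega) (by omega) hT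
        omega
      rw [if_neg (by rw [PySem.Set.contains_iff]; exact hnomem)]
      have heq : PySem.Set.add (seenOf x c) (trajCC x c) = seenOf x (c + 1) := rfl
      rw [heq, ← trajCC_succ]
      exact ih (c + 1) (fun a b ha hb => hinj a b (by omega) (by omega))

-- Phase 2 of B measures the loop length t - j
theorem phase2B_eq (x : List Int) (t j : Nat) (hjt : j < t)
    (hrep : trajCC x t = trajCC x j)
    (hinj : ∀ a b, a < t → b < t → trajCC x a = trajCC x b → a = b) :
    ∀ g k, 1 ≤ k → j + k ≤ t → t ≤ j + k + g →
      phase2B g (trajCC x t) (k : Int) (trajCC x (j + k)) = (t : Int) - (j : Int) := by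
  intro g
  induction g with
  | zero =>
      intro k hk1 hkt hgt
      have hkt' : j + k = t := by omega
      rw [phase2B, if_pos (by rw [hkt'])]
      omega
  | succ g ih =>
      intro k hk1 hkt hgt
      by_cases hend : j + k = t
      · rw [phase2B, if_pos (by rw [hend])]
        omega
      · have hne : trajCC x (j + k) ≠ trajCC x t := by
          intro h
          rw [hrep] at h
          have := hinj (j + k) j (by omega) (by omega) h
          omega
        rw [phase2B, if_neg hne, ← trajCC_succ]
        have := ih (k + 1) (by omega) (by omega) (by omega)
        rw [show j + (k + 1) = j + k + 1 from rfl] at this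
        convert this using 2

-- least repeat time below a known repeat time
theorem exists_min_rep (x : List Int) (t0 : Nat)
    (h : ∃ i, i < t0 ∧ trajCC x i = trajCC x t0) :
    ∃ t, t ≤ t0 ∧ (∃ i, i < t ∧ trajCC x i = trajCC x t) ∧
      ∀ t', t' < t → ¬∃ i, i < t' ∧ trajCC x i = trajCC x t' := by
  induction t0 using Nat.strong_induction_on with
  | _ t0 ih =>
    by_cases h' : ∃ t', t' < t0 ∧ ∃ i, i < t' ∧ trajCC x i = trajCC x t'
    · obtain ⟨t', ht', hP⟩ := h'
      obtain ⟨t, h1, h2, h3⟩ := ih t' ht' hP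
      exact ⟨t, by omega, h2, h3⟩
    · push Not at h'
      refine ⟨t0, le_rfl, h, fun t' hlt hP => ?_⟩
      obtain ⟨i, hi, hieq⟩ := hP
      exact h' t' hlt i hi hieq

-- ===== VERDICT (by name: the statement is the Claim_ definition above) =====
theorem countCycles_spec : Claim_equal_countCycles := by
  intro x _ _
  unfold Spec_countCycles countCycles countCycles_alt
  by_cases hrep : ∃ t, t ≤ pvFuelCC ∧ ∃ i, i < t ∧ trajCC x i = trajCC x t
  · obtain ⟨t0, ht0f, ht0P⟩ := hrep
    obtain ⟨t, htle0, ⟨j, hjt, hjeq⟩, htmin⟩ := exists_min_rep x t0 ht0P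
    have htle : t ≤ pvFuelCC := le_trans htle0 ht0f
    have hinj : ∀ a b, a < t → b < t → trajCC x a = trajCC x b → a = b := by
      intro a b ha hb hab
      by_contra hne
      rcases Nat.lt_or_ge a b with h | h
      · exact htmin b hb ⟨a, h, hab⟩
      · have : a ≠ b := hne
        have h' : b < a := by omega
        exact htmin a ha ⟨b, h', hab.symm⟩
    have hA : cyclesGoA pvFuelCC ((0 : Nat) : Int) (blocksOf x 0) (trajCC x 0)
        = (t : Int) - (j : Int) :=
      cyclesGoA_eq x t j hjt hjeq.symm hinj pvFuelCC 0 (by omega) (by omega)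
    have hB1 : phase1B (pvFuelCC + 1) (seenOf x 0) (trajCC x 0) = some (trajCC x t) :=
      phase1B_eq x t j hjt hjeq.symm hinj (pvFuelCC + 1) 0 (by omega) (by omega)
    have hstep : stepB (trajCC x t) = trajCC x (j + 1) := by
      rw [hjeq.symm, ← trajCC_succ]
    have hB2 : phase2B pvFuelCC (trajCC x t) ((1 : Nat) : Int) (trajCC x (j + 1))
        = (t : Int) - (j : Int) :=
      phase2B_eq x t j hjt hjeq.symm hinj pvFuelCC 1 (by omega) (by omega) (by omega)
    show cyclesGoA pvFuelCC (((0 : Nat)) : Int) (blocksOf x 0) (trajCC x 0) =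
      (match phase1B (pvFuelCC + 1) (seenOf x 0) (trajCC x 0) with
       | none => 0
       | some anchor => phase2B pvFuelCC anchor 1 (stepB anchor))
    rw [hA, hB1]
    simp only [hstep]
    exact hB2.symm
  · push Not at hrep
    have hinj : ∀ a b, a ≤ pvFuelCC → b ≤ pvFuelCC → trajCC x a = trajCC x b → a = b := by
      intro a b ha hb hab
      by_contra hne
      rcases Nat.lt_or_ge a b with h | h
      · exact hrep b hb a h hab
      · have h' : b < a := by omega
        exact hrep a ha b h' hab.symm
    have hA : cyclesGoA pvFuelCC ((0 : Nat) : Int) (blocksOf x 0) (trajCC x 0) = 0 :=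
      cyclesGoA_none x pvFuelCC 0 (fun a b ha hb => hinj a b (by omega) (by omega))
    have hB : phase1B (pvFuelCC + 1) (seenOf x 0) (trajCC x 0) = none :=
      phase1B_none x (pvFuelCC + 1) 0 (fun a b ha hb => hinj a b (by omega) (by omega))
    show cyclesGoA pvFuelCC (((0 : Nat)) : Int) (blocksOf x 0) (trajCC x 0) =
      (match phase1B (pvFuelCC + 1) (seenOf x 0) (trajCC x 0) with
       | none => 0
       | some anchor => phase2B pvFuelCC anchor 1 (stepB anchor))
    rw [hA, hB]
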